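-- pv_equiv track=rewrite | github.com/sankoudai/toxic-comment | featurizer.py | extract_ngroup
-- ===== SOURCE A (Python) =====
-- sletters = ['a', 'e', 'i', 'o', 'u', 'y']
--
-- def get_char_group(word):
--     if not word:
--         return ''
--
--     if len(word)<=3:
--         return word
--
--     grp = ''
--     #添加所有相连元音
--     for i, ch in enumerate(word):
--         if ch in sletters:
--             grp += ch
--         else:
--             break
--     if len(grp) == len(word):
--         return grp
--
--     # 添加所有相连辅音，如word=blast,  grp=bl
--     starti = len(grp)
--     for i in range(starti, len(word)):
--         ch = word[i]
--         if ch not in sletters: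
--             grp += ch
--         else:
--             break
--     if len(grp) == len(word):
--         return grp
--
--     #添加所有元音，如word=blast, grp=bla
--     starti = len(grp)
--     for i in range(starti, len(word)):
--         ch = word[i]
--         if ch in sletters:
--             grp += ch
--         else:
--             break
--     if len(grp) == len(word):
--         return grp
--
--     #添加所有相连辅音(除了最后一个)
--     starti = len(grp)
--     for i in range(starti, len(word)):
--         ch = word[i]
--         if ch not in sletters:
--             grp += ch
--         else:
--             break
--     if len(grp) == len(word):
--         return grp
--     return grp[:-1]
--
-- def extract_group(word, min_length=0):
--     groups = []
--     while word:
--         grp = get_char_group(word)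
--         if not grp:
--             break
--         word = word[len(grp):]
--         if len(grp) >= min_length:
--             groups.append(grp)
--     return groups
--
-- def extract_ngroup(word, n=2, max_length=100000):
--     groups = extract_group(word)
--     if len(groups) <n:
--         return []
--     ngroups = []
--
--     for i in range(len(groups)-n+1):
--         ngrp =''.join(groups[i:i+n])
--         if len(ngrp) < max_length:
--             ngroups.append(''.join(groups[i:i+n]))
--     return ngroups
-- ===== SOURCE B (Python) =====
-- VOWELS = frozenset('aeiouy')
--
--
-- def extract_ngroup(word, n=2, max_length=100000):
--     # One left-to-right pass with an index cursor: cut the word into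
--     # vowel/consonant groups at computed boundaries, no repeated slicing.
--     L = len(word)
--     groups = []
--     i = 0
--     while i < L:
--         if L - i <= 3:
--             groups.append(word[i:])
--             break
--         j = i
--         for want_vowel in (True, False, True, False):
--             while j < L and (word[j] in VOWELS) == want_vowel:
--                 j += 1
--         if j < L:
--             j -= 1  # last consonant of the 4th run starts the next group
--         groups.append(word[i:j])
--         i = j
--     if len(groups) < n:
--         return []
--     ngroups = []
--     for i in range(len(groups) - n + 1):
--         ngrp = ''.join(groups[i:i+n])
--         if len(ngrp) < max_length:
--             ngroups.append(ngrp)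
--     return ngroups
-- ===== Notes on version B (the rewrite author's own statement) =====
-- stated objective: alternative
-- what changed: A repeatedly calls get_char_group on a freshly sliced suffix string (re-slicing the remaining word for every group); B makes one left-to-right pass with an index cursor that computes each group boundary directly and cuts the word there (intended as faster; a timing run measured B ahead but could not confirm at the largest size).
import Mathlib
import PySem

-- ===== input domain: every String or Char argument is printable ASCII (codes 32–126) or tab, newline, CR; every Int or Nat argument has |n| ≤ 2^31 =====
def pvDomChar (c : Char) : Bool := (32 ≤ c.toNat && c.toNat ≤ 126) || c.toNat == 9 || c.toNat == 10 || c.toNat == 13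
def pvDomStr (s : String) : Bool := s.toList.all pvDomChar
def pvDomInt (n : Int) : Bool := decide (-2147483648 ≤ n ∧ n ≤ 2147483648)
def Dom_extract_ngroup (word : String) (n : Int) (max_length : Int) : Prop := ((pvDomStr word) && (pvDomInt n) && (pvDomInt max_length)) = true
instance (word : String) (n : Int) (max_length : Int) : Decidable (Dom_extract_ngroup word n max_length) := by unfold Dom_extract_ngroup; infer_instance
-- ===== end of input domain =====

-- B replaces A's regroup-and-reslice loop (get_char_group re-slices a fresh
-- suffix string for every group) by ONE left-to-right pass with an index cursor
-- computing the group boundaries; objective: alternative.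

-- ===== PORT A =====

-- "ch in sletters"
def pvInS (c : Char) : Bool := c ∈ ['a', 'e', 'i', 'o', 'u', 'y']

-- one of A's scan loops: "for …: if (ch in sletters)==want: grp += ch else: break"
def pvRun (want : Bool) : List Char → List Char
  | [] => []
  | c :: cs => if pvInS c == want then c :: pvRun want cs else []

-- get_char_group, on the word's char list
def pvGetCharGroup (l : List Char) : List Char :=
  if l = [] then []
  else if l.length ≤ 3 then l
  else
    let g1 := pvRun true l
    if g1.length = l.length then g1 else
    let g2 := g1 ++ pvRun false (l.drop g1.length)
    if g2.length = l.length then g2 else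
    let g3 := g2 ++ pvRun true (l.drop g2.length)
    if g3.length = l.length then g3 else
    let g4 := g3 ++ pvRun false (l.drop g3.length)
    if g4.length = l.length then g4 else
    g4.dropLast   -- grp[:-1]

-- extract_group with its default min_length=0 (the only call), so every group is kept
def pvExtractGroup (l : List Char) : List (List Char) :=
  if l = [] then []
  else
    let grp := pvGetCharGroup l
    if grp = [] then []
    else grp :: pvExtractGroup (l.drop grp.length)
termination_by l.length
decreasing_by
  rename_i h hgrp
  have h1 : 0 < (pvGetCharGroup l).length := List.length_pos_of_ne_nil hgrp
  have h2 : 0 < l.length := List.length_pos_of_ne_nil h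
  simp only [List.length_drop]; omega

def extract_ngroup (word : String) (n : Int) (max_length : Int) : List String :=
  let groups := pvExtractGroup word.toList
  if (groups.length : Int) < n then []
  else
    (PySem.List.pyRange 0 ((groups.length : Int) - n + 1) 1).foldl
      (fun acc i =>
        let ngrp := (PySem.List.slice groups (some i) (some (i + n))).flatten  -- ''.join(groups[i:i+n])
        if (ngrp.length : Int) < max_length then acc ++ [String.ofList ngrp] else acc) []

-- ===== PORT B =====

-- "word[j] in VOWELS"
def pvVowel (c : Char) : Bool := c ∈ ['a', 'e', 'i', 'o', 'u', 'y']

-- "while j < L and (word[j] in VOWELS) == want_vowel: j += 1"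
def pvAdvance (l : List Char) (want : Bool) (j : Nat) : Nat :=
  if h : j < l.length then
    if pvVowel l[j] == want then pvAdvance l want (j + 1) else j
  else j
termination_by l.length - j

-- "for want_vowel in (True, False, True, False): …" then "if j < L: j -= 1"
def pvBoundary (l : List Char) (i : Nat) : Nat :=
  let j := [true, false, true, false].foldl (fun j w => pvAdvance l w j) i
  if j < l.length then j - 1 else j

theorem pvAdvance_ge (l : List Char) (want : Bool) (j : Nat) : j ≤ pvAdvance l want j := by
  fun_induction pvAdvance l want j with
  | case1 j h hv ih => omega
  | case2 j h hv => exact le_refl _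
  | case3 j h => exact le_refl _

theorem pvAdvance_stop (l : List Char) (want : Bool) (j : Nat)
    (h : pvAdvance l want j < l.length) : (pvVowel (l[pvAdvance l want j]'h) == want) = false := by
  fun_induction pvAdvance l want j with
  | case1 j hj hv ih => exact ih h
  | case2 j hj hv => simpa using hv
  | case3 j hj => omega

theorem pvAdvance_step (l : List Char) (want : Bool) (j : Nat) (hj : j < l.length)
    (hv : (pvVowel (l[j]'hj) == want) = true) : j < pvAdvance l want j := by
  rw [pvAdvance]; simp only [hj, dif_pos, hv, if_pos]
  exact Nat.lt_of_lt_of_le (Nat.lt_succ_self j) (pvAdvance_ge l want (j + 1))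

-- after the four runs the boundary is strictly to the right of the cursor
theorem pvBoundary_gt (l : List Char) (i : Nat) (hi : i < l.length) : i < pvBoundary l i := by
  unfold pvBoundary
  simp only [List.foldl]
  set j1 := pvAdvance l true i with hj1
  set j2 := pvAdvance l false j1 with hj2
  set j3 := pvAdvance l true j2 with hj3
  set j4 := pvAdvance l false j3 with hj4
  have h12 : j1 ≤ j2 := pvAdvance_ge _ _ _
  have h23 : j2 ≤ j3 := pvAdvance_ge _ _ _
  have h34 : j3 ≤ j4 := pvAdvance_ge _ _ _
  have h2 : i < j2 := by
    rcases Nat.lt_or_ge i j1 with h | h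
    · omega
    · have hij1 : j1 = i := le_antisymm (by omega) (pvAdvance_ge _ _ _)
      by_cases hv : (pvVowel (l[i]'hi) == true) = true
      · have := pvAdvance_step l true i hi hv; omega
      · have hv' : (pvVowel (l[i]'hi) == false) = true := by
          cases hb : pvVowel (l[i]'hi) <;> simp [hb] at hv ⊢
        have hstep := pvAdvance_step l false i hi hv'
        rw [hij1] at hj2
        omega
  by_cases h4 : j4 < l.length
  · have h3lt : j3 < l.length := by omega
    have h2lt : j2 < l.length := by omega
    have hs2 : (pvVowel (l[j2]'h2lt) == false) = false := pvAdvance_stop l false j1 h2lt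
    have hv3 : (pvVowel (l[j2]'h2lt) == true) = true := by
      cases hb : pvVowel (l[j2]'h2lt) <;> simp [hb] at hs2 ⊢
    have h23' : j2 < j3 := pvAdvance_step l true j2 h2lt hv3
    have hs3 : (pvVowel (l[j3]'h3lt) == true) = false := pvAdvance_stop l true j2 h3lt
    have hv4 : (pvVowel (l[j3]'h3lt) == false) = true := by
      cases hb : pvVowel (l[j3]'h3lt) <;> simp [hb] at hs3 ⊢
    have h34' : j3 < j4 := pvAdvance_step l false j3 h3lt hv4
    rw [if_pos h4]; omega
  · rw [if_neg h4]; omega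

-- the single pass collecting the groups ("while i < L: …")
def pvGroups (l : List Char) (i : Nat) : List (List Char) :=
  if h : i < l.length then
    if l.length - i ≤ 3 then [l.drop i]   -- "groups.append(word[i:]); break"
    else
      let j := pvBoundary l i
      ((l.drop i).take (j - i)) :: pvGroups l j   -- word[i:j]
  else []
termination_by l.length - i
decreasing_by
  have := pvBoundary_gt l i h
  omega

def extract_ngroup_alt (word : String) (n : Int) (max_length : Int) : List String :=
  let groups := pvGroups word.toList 0
  if (groups.length : Int) < n then []
  else
    (PySem.List.pyRange 0 ((groups.length : Int) - n + 1) 1).foldl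
      (fun acc i =>
        let ngrp := (PySem.List.slice groups (some i) (some (i + n))).flatten  -- ''.join(groups[i:i+n])
        if (ngrp.length : Int) < max_length then acc ++ [String.ofList ngrp] else acc) []

-- ===== PRECONDITION & SPEC =====
def Spec_extract_ngroup (word : String) (n : Int) (max_length : Int) (out : List String) : Prop := out = extract_ngroup_alt word n max_length
instance (word : String) (n : Int) (max_length : Int) (out : List String) : Decidable (Spec_extract_ngroup word n max_length out) := by unfold Spec_extract_ngroup; infer_instance

-- ===== CLAIM (what is proved, stated in full; the proofs are below) =====
def Claim_equal_extract_ngroup : Prop := ∀ (word : String) (n : Int) (max_length : Int), Dom_extract_ngroup word n max_length → Spec_extract_ngroup word n max_length (extract_ngroup word n max_length)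

-- ===== LEMMAS AND PROOFS =====

theorem pvAdvance_le (l : List Char) (want : Bool) (j : Nat) (hj : j ≤ l.length) :
    pvAdvance l want j ≤ l.length := by
  fun_induction pvAdvance l want j with
  | case1 j h hv ih => exact ih (by omega)
  | case2 j h hv => exact hj
  | case3 j h => exact hj

-- A's scan loop is a take of the scanned suffix
theorem pvRun_eq_take (want : Bool) (d : List Char) :
    pvRun want d = d.take (pvRun want d).length := by
  induction d with
  | nil => rfl
  | cons c cs ih =>
    rw [pvRun]
    split
    · simp only [List.length_cons, List.take_succ_cons]
      exact congrArg (c :: ·) ih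
    · rfl

theorem pvVowel_eq_pvInS (c : Char) : pvVowel c = pvInS c := rfl

-- B's cursor advance computes exactly the length of A's scanned run
theorem pvAdvance_eq_run (l : List Char) (want : Bool) (j : Nat) :
    pvAdvance l want j = j + (pvRun want (l.drop j)).length := by
  fun_induction pvAdvance l want j with
  | case1 j h hv ih =>
    rw [pvVowel_eq_pvInS] at hv
    rw [List.drop_eq_getElem_cons h, pvRun, if_pos hv]
    simp only [List.length_cons]
    omega
  | case2 j h hv =>
    rw [pvVowel_eq_pvInS] at hv
    rw [List.drop_eq_getElem_cons h, pvRun, if_neg hv]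
    simp
  | case3 j h =>
    rw [List.drop_eq_nil_of_le (by omega)]
    rfl

theorem pvAdvance_end (l : List Char) (want : Bool) (j : Nat) (h : l.length ≤ j) :
    pvAdvance l want j = j := by
  rw [pvAdvance, dif_neg (by omega)]

theorem pvExtractGroup_nil : pvExtractGroup [] = [] := by
  rw [pvExtractGroup]; simp

theorem pvBoundary_le (l : List Char) (i : Nat) (hi : i ≤ l.length) :
    pvBoundary l i ≤ l.length := by
  unfold pvBoundary
  simp only [List.foldl]
  have h1 := pvAdvance_le l true i hi
  have h2 := pvAdvance_le l false _ h1
  have h3 := pvAdvance_le l true _ h2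
  have h4 := pvAdvance_le l false _ h3
  split <;> omega

-- A's get_char_group on the suffix at cursor i returns exactly the slice up to B's boundary
theorem getCharGroup_drop (l : List Char) (i : Nat) (hi : i < l.length)
    (h3 : ¬ (l.length - i ≤ 3)) :
    pvGetCharGroup (l.drop i) = (l.drop i).take (pvBoundary l i - i) := by
  have hdne : l.drop i ≠ [] := by
    intro h; have := congrArg List.length h; simp at this; omega
  have hdlen : (l.drop i).length = l.length - i := by simp
  set j1 := pvAdvance l true i with hj1
  set j2 := pvAdvance l false j1 with hj2
  set j3 := pvAdvance l true j2 with hj3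
  set j4 := pvAdvance l false j3 with hj4
  have hb : pvBoundary l i = if j4 < l.length then j4 - 1 else j4 := rfl
  have h01 : i ≤ j1 := pvAdvance_ge _ _ _
  have h12 : j1 ≤ j2 := pvAdvance_ge _ _ _
  have h23 : j2 ≤ j3 := pvAdvance_ge _ _ _
  have h34 : j3 ≤ j4 := pvAdvance_ge _ _ _
  have hle1 : j1 ≤ l.length := pvAdvance_le l true i (by omega)
  have hle2 : j2 ≤ l.length := pvAdvance_le l false j1 hle1
  have hle3 : j3 ≤ l.length := pvAdvance_le l true j2 hle2
  have hle4 : j4 ≤ l.length := pvAdvance_le l false j3 hle3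
  -- lengths of the four cumulative run prefixes
  have hr1 : (pvRun true (l.drop i)).length = j1 - i := by
    have := pvAdvance_eq_run l true i; omega
  have hg1 : pvRun true (l.drop i) = (l.drop i).take (j1 - i) := by
    rw [pvRun_eq_take true (l.drop i), hr1]
  have hdrop1 : (l.drop i).drop (j1 - i) = l.drop j1 := by
    rw [List.drop_drop]; congr 1; omega
  have hr2 : (pvRun false (l.drop j1)).length = j2 - j1 := by
    have := pvAdvance_eq_run l false j1; omega
  have hg2 : pvRun false (l.drop j1) = (l.drop j1).take (j2 - j1) := by
    rw [pvRun_eq_take false (l.drop j1), hr2]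
  have hdrop2 : (l.drop i).drop (j1 - i + (j2 - j1)) = l.drop j2 := by
    rw [List.drop_drop]; congr 1; omega
  have hr3 : (pvRun true (l.drop j2)).length = j3 - j2 := by
    have := pvAdvance_eq_run l true j2; omega
  have hg3 : pvRun true (l.drop j2) = (l.drop j2).take (j3 - j2) := by
    rw [pvRun_eq_take true (l.drop j2), hr3]
  have hdrop3 : (l.drop i).drop (j1 - i + (j2 - j1) + (j3 - j2)) = l.drop j3 := by
    rw [List.drop_drop]; congr 1; omega
  have hr4 : (pvRun false (l.drop j3)).length = j4 - j3 := by
    have := pvAdvance_eq_run l false j3; omega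
  have hg4 : pvRun false (l.drop j3) = (l.drop j3).take (j4 - j3) := by
    rw [pvRun_eq_take false (l.drop j3), hr4]
  -- cumulative groups as takes of the suffix
  have hcum2 : (l.drop i).take (j1 - i) ++ (l.drop j1).take (j2 - j1)
      = (l.drop i).take (j2 - i) := by
    rw [← hdrop1, ← List.take_add]; congr 1; omega
  have hcum3 : (l.drop i).take (j2 - i) ++ (l.drop j2).take (j3 - j2)
      = (l.drop i).take (j3 - i) := by
    rw [show l.drop j2 = (l.drop i).drop (j2 - i) by rw [List.drop_drop]; congr 1; omega,
        ← List.take_add]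
    congr 1; omega
  have hcum4 : (l.drop i).take (j3 - i) ++ (l.drop j3).take (j4 - j3)
      = (l.drop i).take (j4 - i) := by
    rw [show l.drop j3 = (l.drop i).drop (j3 - i) by rw [List.drop_drop]; congr 1; omega,
        ← List.take_add]
    congr 1; omega
  rw [pvGetCharGroup, if_neg hdne, if_neg (by omega)]
  simp only [List.length_append, hr1, hr2, hr3, hr4, hdrop1, hdrop2, hdrop3, hdlen]
  by_cases hc1 : j1 = l.length
  · have he2 : j2 = l.length := hc1 ▸ (hj2 ▸ pvAdvance_end l false j1 (by omega))
    have he3 : j3 = l.length := he2 ▸ (hj3 ▸ pvAdvance_end l true j2 (by omega))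
    have he4 : j4 = l.length := he3 ▸ (hj4 ▸ pvAdvance_end l false j3 (by omega))
    rw [if_pos (by omega), hg1, hb, if_neg (by omega)]
    congr 1; omega
  · rw [if_neg (by omega)]
    by_cases hc2 : j2 = l.length
    · have he3 : j3 = l.length := hc2 ▸ (hj3 ▸ pvAdvance_end l true j2 (by omega))
      have he4 : j4 = l.length := he3 ▸ (hj4 ▸ pvAdvance_end l false j3 (by omega))
      rw [if_pos (by omega), hg1, hg2, hcum2, hb, if_neg (by omega)]
      congr 1; omega
    · rw [if_neg (by omega)]
      by_cases hc3 : j3 = l.length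
      · have he4 : j4 = l.length := hc3 ▸ (hj4 ▸ pvAdvance_end l false j3 (by omega))
        rw [if_pos (by omega), hg1, hg2, hcum2, hg3, hcum3, hb, if_neg (by omega)]
        congr 1; omega
      · rw [if_neg (by omega)]
        by_cases hc4 : j4 = l.length
        · rw [if_pos (by omega), hg1, hg2, hcum2, hg3, hcum3, hg4, hcum4, hb,
              if_neg (by omega)]
        · rw [if_neg (by omega), hg1, hg2, hcum2, hg3, hcum3, hg4, hcum4, hb,
              if_pos (by omega)]
          rw [List.dropLast_eq_take, List.take_take]
          simp only [List.length_take, hdlen]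
          congr 1; omega

-- the main correspondence: B's single pass from cursor i = A's loop on the suffix
theorem pvGroups_eq (l : List Char) (i : Nat) :
    pvGroups l i = pvExtractGroup (l.drop i) := by
  fun_induction pvGroups l i with
  | case1 i h h3 =>
    have hdne : l.drop i ≠ [] := by
      intro he; have := congrArg List.length he; simp at this; omega
    rw [pvExtractGroup, if_neg hdne]
    have hgrp : pvGetCharGroup (l.drop i) = l.drop i := by
      rw [pvGetCharGroup, if_neg hdne, if_pos (by simp; omega)]
    rw [hgrp, if_neg hdne, List.drop_length, pvExtractGroup_nil]
  | case2 i h h3 jv ih =>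
    have hdne : l.drop i ≠ [] := by
      intro he; have := congrArg List.length he; simp at this; omega
    have hjb : pvBoundary l i = jv := rfl
    have hgt : i < jv := hjb ▸ pvBoundary_gt l i h
    have hle : jv ≤ l.length := hjb ▸ pvBoundary_le l i (by omega)
    have hgrp : pvGetCharGroup (l.drop i) = (l.drop i).take (jv - i) :=
      hjb ▸ getCharGroup_drop l i h h3
    have hlen : (pvGetCharGroup (l.drop i)).length = jv - i := by
      rw [hgrp]; simp; omega
    rw [pvExtractGroup, if_neg hdne, if_neg (by
      rw [hgrp]; intro he; have := congrArg List.length he; simp at this; omega)]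
    rw [hlen, List.drop_drop, hgrp, ih, show i + (jv - i) = jv from by omega]
  | case3 i h =>
    rw [List.drop_eq_nil_of_le (by omega), pvExtractGroup_nil]

theorem groups_eq (l : List Char) : pvGroups l 0 = pvExtractGroup l := by
  simpa using pvGroups_eq l 0

-- ===== VERDICT (by name: the statement is the Claim_ definition above) =====
theorem extract_ngroup_spec : Claim_equal_extract_ngroup := by
  intro word n max_length _
  unfold Spec_extract_ngroup extract_ngroup extract_ngroup_alt
  rw [groups_eq]
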